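-- pv_equiv track=rewrite | github.com/DigiBugCat/fmp-mcp | tools/edgar.py | _split_sub_sections
-- ===== SOURCE A (Python) =====
-- _MIN_CONTENT_CHARS = 50
--
-- def _split_sub_sections(section_key: str, text: str) -> dict[str, str]:
--     """Split a section into sub-sections by detecting header blocks.
--
--     Headers are short paragraph blocks (< 100 chars) that look like titles —
--     no trailing punctuation, no bullet markers, no leading whitespace indentation.
--     Returns dict of "section_key/header" -> full sub-section text.
--     If no sub-headers found, returns the whole section under "section_key/_full".
--     """
--     blocks = [b.strip() for b in text.split("\n\n") if b.strip()]
--     if not blocks: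
--         return {f"{section_key}/_full": text}
--
--     # Characters that indicate a block is a list item, not a header
--     _BULLET_CHARS = {"•", "·", "−", "–", "—", "-", "*", "►", "▪", "○", "●"}
--
--     # Detect header indices
--     header_indices: list[tuple[int, str]] = []
--     for i, block in enumerate(blocks):
--         stripped = block.rstrip()
--         is_short = len(stripped) < 100
--         # Headers don't end with sentence-ending punctuation
--         ends_with_punct = stripped[-1] in ".;:,)" if stripped else True
--         # Headers aren't bullet/list items
--         first_char = stripped[0] if stripped else ""
--         is_bullet = first_char in _BULLET_CHARS or (
--             len(stripped) > 1 and stripped[0].isdigit() and stripped[1] in ".)"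
--         )
--         # Headers aren't page numbers / footers (very short + has digits)
--         is_footer = len(stripped) < _MIN_CONTENT_CHARS and any(c.isdigit() for c in stripped)
--         # Headers shouldn't contain newlines (multi-line blocks are paragraphs)
--         is_multiline = "\n" in block.strip()
--         if is_short and not ends_with_punct and not is_bullet and not is_footer and not is_multiline and len(stripped) > 5:
--             header_indices.append((i, block))
--
--     if len(header_indices) <= 1:
--         # No meaningful sub-structure
--         return {f"{section_key}/_full": text}
--
--     # Build sub-sections from header to next header
--     sub_sections: dict[str, str] = {}
--     for pos, (idx, header) in enumerate(header_indices):
--         next_idx = header_indices[pos + 1][0] if pos + 1 < len(header_indices) else len(blocks)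
--         content_blocks = blocks[idx:next_idx]
--         content = "\n\n".join(content_blocks)
--         if len(content) >= _MIN_CONTENT_CHARS:
--             # Clean header for use as key
--             clean_header = header.strip().replace("\n", " ")
--             sub_sections[f"{section_key}/{clean_header}"] = content
--
--     return sub_sections or {f"{section_key}/_full": text}
-- ===== SOURCE B (Python) =====
-- _MIN_CONTENT_CHARS = 50
--
-- _BULLET_CHARS = {"•", "·", "−", "–", "—", "-", "*", "►", "▪", "○", "●"}
--
--
-- def _is_header(block: str) -> bool:
--     stripped = block.rstrip()
--     is_short = len(stripped) < 100
--     ends_with_punct = stripped[-1] in ".;:,)" if stripped else True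
--     first_char = stripped[0] if stripped else ""
--     is_bullet = first_char in _BULLET_CHARS or (
--         len(stripped) > 1 and stripped[0].isdigit() and stripped[1] in ".)"
--     )
--     is_footer = len(stripped) < _MIN_CONTENT_CHARS and any(c.isdigit() for c in stripped)
--     is_multiline = "\n" in block.strip()
--     return is_short and not ends_with_punct and not is_bullet and not is_footer and not is_multiline and len(stripped) > 5
--
--
-- def _emit(sub_sections: dict, section_key: str, header: str, group: list) -> None:
--     content = "\n\n".join(group)
--     if len(content) >= _MIN_CONTENT_CHARS:
--         clean_header = header.strip().replace("\n", " ")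
--         sub_sections[f"{section_key}/{clean_header}"] = content
--
--
-- def _split_sub_sections(section_key: str, text: str) -> dict:
--     blocks = [b.strip() for b in text.split("\n\n") if b.strip()]
--     if sum(1 for b in blocks if _is_header(b)) <= 1:
--         return {f"{section_key}/_full": text}
--     sub_sections: dict = {}
--     header = None
--     group: list = []
--     for b in blocks:
--         if _is_header(b):
--             if header is not None:
--                 _emit(sub_sections, section_key, header, group)
--             header, group = b, [b]
--         elif header is not None:
--             group.append(b)
--     if header is not None:
--         _emit(sub_sections, section_key, header, group)
--     return sub_sections or {f"{section_key}/_full": text}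
-- ===== Notes on version B (the rewrite author's own statement) =====
-- stated objective: alternative
-- what changed: Replaces A's collect-header-indices-then-slice-by-index structure with a single streaming pass over the blocks that maintains a current (header, group) accumulator and flushes it whenever the next header is seen (after one counting pass establishes that at least two headers exist).
import Mathlib
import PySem

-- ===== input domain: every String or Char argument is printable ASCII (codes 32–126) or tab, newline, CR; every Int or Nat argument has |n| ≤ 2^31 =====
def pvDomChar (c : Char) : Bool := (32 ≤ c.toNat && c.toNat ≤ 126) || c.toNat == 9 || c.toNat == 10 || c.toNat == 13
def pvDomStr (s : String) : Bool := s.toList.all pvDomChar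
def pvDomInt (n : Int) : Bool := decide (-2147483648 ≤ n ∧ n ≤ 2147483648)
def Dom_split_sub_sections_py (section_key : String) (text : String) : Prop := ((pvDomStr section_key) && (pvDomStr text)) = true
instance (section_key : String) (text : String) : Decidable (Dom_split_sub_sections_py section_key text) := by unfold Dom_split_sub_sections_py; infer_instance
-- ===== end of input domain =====

-- B replaces A's collect-header-indices-then-slice-by-index structure with a single streaming
-- pass maintaining a current (header, group) accumulator (objective: alternative, same cost).

-- Helpers shared by both Pythons verbatim (block preprocessing, the header test, the
-- length-filtered dict insertion); each is a literal transliteration of the shared code.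
def pvBullets : List Char := ['•', '·', '−', '–', '—', '-', '*', '►', '▪', '○', '●']

-- Python's `c in ".;:,)"` on a single character is ported as char-list membership (exact).
def pvIsHeader (block : String) : Bool :=
  let l := (PySem.Str.rstrip block).toList
  let is_short := decide (l.length < 100)
  let ends_with_punct := match l.getLast? with
    | some c => ".;:,)".toList.contains c
    | none => true
  let is_bullet :=
    (match l.head? with
      | some c => pvBullets.contains c
      | none => false) ||
    (match l with
      | c0 :: c1 :: _ => PySem.Chars.isdigit c0 && ".)".toList.contains c1
      | _ => false)
  let is_footer := decide (l.length < 50) && l.any PySem.Chars.isdigit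
  let is_multiline := PySem.Str.isIn "\n" (PySem.Str.strip block)
  is_short && !ends_with_punct && !is_bullet && !is_footer && !is_multiline && decide (5 < l.length)

-- blocks = [b.strip() for b in text.split("\n\n") if b.strip()]
def pvBlocks (text : String) : List String :=
  (((PySem.Str.split? text "\n\n").getD []).map PySem.Str.strip).filter (fun b => b != "")

-- if len(content) >= 50: d[f"{section_key}/{header.strip().replace('\n',' ')}"] = content
def pvEmit (section_key : String) (d : PySem.Dict String String) (header : String)
    (group : List String) : PySem.Dict String String :=
  let content := PySem.Str.join "\n\n" group
  if (50 : Int) ≤ PySem.Str.len content then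
    d.insert (section_key ++ "/" ++ PySem.Str.replace (PySem.Str.strip header) "\n" " ") content
  else d

-- ===== PORT A =====
def split_sub_sections_py (section_key : String) (text : String) : List (String × String) :=
  let blocks := pvBlocks text
  if blocks = [] then [(section_key ++ "/_full", text)]
  else
    let header_indices := (PySem.List.enumerate blocks).foldl
      (fun acc p => if pvIsHeader p.2 then acc ++ [p] else acc) []
    if header_indices.length ≤ 1 then [(section_key ++ "/_full", text)]
    else
      let d := (PySem.List.enumerate header_indices).foldl
        (fun d pe =>
          let next_idx : Int :=
            if pe.1 + 1 < PySem.List.len header_indices then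
              (PySem.List.pyGetD header_indices (pe.1 + 1) (0, "")).1
            else PySem.List.len blocks
          pvEmit section_key d pe.2.2 (PySem.List.slice blocks (some pe.2.1) (some next_idx)))
        PySem.Dict.empty
      if d.items = [] then [(section_key ++ "/_full", text)] else d.items

-- ===== PORT B =====
def pvStep (section_key : String)
    (st : PySem.Dict String String × Option (String × List String)) (b : String) :
    PySem.Dict String String × Option (String × List String) :=
  if pvIsHeader b then
    (match st.2 with
      | some (h, g) => pvEmit section_key st.1 h g
      | none => st.1,
      some (b, [b]))
  else
    match st.2 with
    | some (h, g) => (st.1, some (h, g ++ [b]))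
    | none => st

def split_sub_sections_py_alt (section_key : String) (text : String) : List (String × String) :=
  let blocks := pvBlocks text
  if blocks.countP (fun b => pvIsHeader b) ≤ 1 then [(section_key ++ "/_full", text)]
  else
    let fin := blocks.foldl (pvStep section_key) (PySem.Dict.empty, none)
    let d := match fin.2 with
      | some (h, g) => pvEmit section_key fin.1 h g
      | none => fin.1
    if d.items = [] then [(section_key ++ "/_full", text)] else d.items

-- ===== PRECONDITION & SPEC =====
def Spec_split_sub_sections_py (section_key : String) (text : String) (out : List (String × String)) : Prop := out = split_sub_sections_py_alt section_key text
instance (section_key : String) (text : String) (out : List (String × String)) : Decidable (Spec_split_sub_sections_py section_key text out) := by unfold Spec_split_sub_sections_py; infer_instance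

-- ===== CLAIM (what is proved, stated in full; the proofs are below) =====
def Claim_equal_split_sub_sections_py : Prop := ∀ (section_key : String) (text : String), Dom_split_sub_sections_py section_key text → Spec_split_sub_sections_py section_key text (split_sub_sections_py section_key text)

-- ===== LEMMAS AND PROOFS =====

-- Nat-indexed list of (position, block) of the header blocks, in order.
def pvHsN : List String → List (Nat × String)
  | [] => []
  | b :: bs => (if pvIsHeader b then [((0 : Nat), b)] else []) ++
      (pvHsN bs).map (fun p => (p.1 + 1, p.2))

-- B's streaming pass, unrolled into two structural phases (proof-side only).
def pvGoB (sk : String) : PySem.Dict String String → String → List String → List String →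
    PySem.Dict String String
  | d, h, g, [] => pvEmit sk d h g
  | d, h, g, b :: bs =>
    if pvIsHeader b then pvGoB sk (pvEmit sk d h g) b [b] bs else pvGoB sk d h (g ++ [b]) bs

def pvGoTop (sk : String) : PySem.Dict String String → List String → PySem.Dict String String
  | d, [] => d
  | d, b :: bs => if pvIsHeader b then pvGoB sk d b [b] bs else pvGoTop sk d bs

def pvFin (sk : String)
    (st : PySem.Dict String String × Option (String × List String)) : PySem.Dict String String :=
  match st.2 with
  | some (h, g) => pvEmit sk st.1 h g
  | none => st.1

-- A's per-header "next index" list and the zipped slice-fold (proof-side normal form of A).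
def pvNexts (blocks : List String) : List Nat :=
  ((pvHsN blocks).map (·.1)).drop 1 ++ [blocks.length]

def pvZFold (sk : String) (blocks : List String) (d : PySem.Dict String String)
    (ps : List ((Nat × String) × Nat)) : PySem.Dict String String :=
  ps.foldl (fun d q => pvEmit sk d q.1.2 ((blocks.drop q.1.1).take (q.2 - q.1.1))) d

lemma pvEnumFilter (bs : List String) : ∀ s : Int,
    (PySem.List.enumerate bs s).filter (fun p => pvIsHeader p.2) =
      (pvHsN bs).map (fun p => (s + (p.1 : Int), p.2)) := by
  induction bs with
  | nil => intro s; simp [PySem.List.enumerate_nil, pvHsN]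
  | cons b bs ih =>
    intro s
    have hmm : ((pvHsN bs).map (fun p : Nat × String => (p.1 + 1, p.2))).map
          (fun p => (s + (p.1 : Int), p.2)) =
        (pvHsN bs).map (fun p => (s + 1 + (p.1 : Int), p.2)) := by
      rw [List.map_map]
      refine List.map_congr_left ?_
      intro p _
      simp only [Function.comp, Prod.mk.injEq, and_true]
      push_cast
      omega
    rw [PySem.List.enumerate_cons, List.filter_cons]
    by_cases hH : pvIsHeader b = true
    · simp only [pvHsN, hH, if_pos, List.map_append, List.map_cons, List.map_nil, hmm,
        List.cons_append, List.nil_append, ih (s + 1), decide_true]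
      simp
    · simp only [pvHsN, hH, Bool.false_eq_true, if_false, List.nil_append, hmm,
        ih (s + 1), decide_false]

lemma pvHsN_length (bs : List String) :
    (pvHsN bs).length = bs.countP (fun b => pvIsHeader b) := by
  induction bs with
  | nil => simp [pvHsN]
  | cons b bs ih =>
    by_cases hH : pvIsHeader b = true <;>
      simp [pvHsN, hH, List.countP_cons, ih]

lemma pvHsN_nil_noheader (bs : List String) (h : pvHsN bs = []) :
    ∀ x ∈ bs, pvIsHeader x = false := by
  induction bs with
  | nil => simp
  | cons b bs ih =>
    rw [pvHsN] at h
    by_cases hH : pvIsHeader b = true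
    · simp [hH] at h
    · simp only [hH, Bool.false_eq_true, if_false, List.nil_append,
        List.map_eq_nil_iff] at h
      intro x hx
      rcases List.mem_cons.mp hx with rfl | hx'
      · simpa using hH
      · exact ih h x hx'

lemma pvTake_nil (bs : List String) (h : pvHsN bs = []) :
    bs.takeWhile (fun x => !pvIsHeader x) = bs := by
  have := pvHsN_nil_noheader bs h
  induction bs with
  | nil => rfl
  | cons b bs ih =>
    have hb : pvIsHeader b = false := this b (List.mem_cons_self ..)
    simp only [List.takeWhile_cons, hb, Bool.not_false, if_pos, List.cons.injEq, true_and]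
    simp only [pvHsN, hb, Bool.false_eq_true, if_false, List.nil_append,
      List.map_eq_nil_iff] at h
    exact ih h (fun x hx => this x (List.mem_cons_of_mem _ hx))

lemma pvTake_cons (bs : List String) (i : Nat) (hd : String) (rest : List (Nat × String))
    (h : pvHsN bs = (i, hd) :: rest) :
    bs.take i = bs.takeWhile (fun x => !pvIsHeader x) := by
  induction bs generalizing i hd rest with
  | nil => simp [pvHsN] at h
  | cons b bs ih =>
    by_cases hH : pvIsHeader b = true
    · simp only [pvHsN, hH, if_pos, List.cons_append, List.nil_append,
        List.cons.injEq, Prod.mk.injEq] at h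
      obtain ⟨⟨rfl, rfl⟩, -⟩ := h
      simp [List.takeWhile_cons, hH]
    · simp only [pvHsN, hH, Bool.false_eq_true, if_false, List.nil_append] at h
      cases hbs : pvHsN bs with
      | nil => simp [hbs] at h
      | cons q qs =>
        simp only [hbs, List.map_cons, List.cons.injEq, Prod.mk.injEq] at h
        obtain ⟨⟨hi, -⟩, -⟩ := h
        subst hi
        simp only [List.take_succ_cons, List.takeWhile_cons, hH, Bool.not_false, if_pos,
          List.cons.injEq, true_and]
        exact ih q.1 q.2 qs (by simpa using hbs)

lemma pvGoTop_noheader (sk : String) (bs : List String)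
    (h : ∀ x ∈ bs, pvIsHeader x = false) : ∀ d, pvGoTop sk d bs = d := by
  induction bs with
  | nil => intro d; rfl
  | cons b bs ih =>
    intro d
    have hb : pvIsHeader b = false := h b (List.mem_cons_self ..)
    simp only [pvGoTop, hb, Bool.false_eq_true, if_false]
    exact ih (fun x hx => h x (List.mem_cons_of_mem _ hx)) d

lemma pvGB (sk : String) (bs : List String) : ∀ d h g,
    pvGoB sk d h g bs =
      pvGoTop sk (pvEmit sk d h (g ++ bs.takeWhile (fun x => !pvIsHeader x))) bs := by
  induction bs with
  | nil => intro d h g; simp [pvGoB, pvGoTop]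
  | cons b bs ih =>
    intro d h g
    by_cases hH : pvIsHeader b = true
    · simp [pvGoB, pvGoTop, List.takeWhile_cons, hH]
    · simp only [pvGoB, pvGoTop, List.takeWhile_cons, hH, Bool.false_eq_true, if_false,
        Bool.not_false, if_pos, ih]
      simp

lemma pvFoldB_some (sk : String) (bs : List String) : ∀ d h g,
    pvFin sk (bs.foldl (pvStep sk) (d, some (h, g))) = pvGoB sk d h g bs := by
  induction bs with
  | nil => intro d h g; rfl
  | cons b bs ih =>
    intro d h g
    by_cases hH : pvIsHeader b = true <;>
      simp [List.foldl_cons, pvStep, hH, ih, pvGoB]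

lemma pvFoldB_none (sk : String) (bs : List String) : ∀ d,
    pvFin sk (bs.foldl (pvStep sk) (d, none)) = pvGoTop sk d bs := by
  induction bs with
  | nil => intro d; rfl
  | cons b bs ih =>
    intro d
    by_cases hH : pvIsHeader b = true
    · simp [List.foldl_cons, pvStep, hH, pvFoldB_some, pvGoTop, pvGoB]
    · simp [List.foldl_cons, pvStep, hH, ih, pvGoTop]

lemma pvZFold_shift (sk : String) (b : String) (bs : List String) :
    ∀ (l : List (Nat × String)) (ns : List Nat) (d : PySem.Dict String String),
      pvZFold sk (b :: bs) d
          ((l.map (fun p => (p.1 + 1, p.2))).zip (ns.map (· + 1))) =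
        pvZFold sk bs d (l.zip ns) := by
  intro l
  induction l with
  | nil => intro ns d; simp [pvZFold]
  | cons p l ih =>
    intro ns d
    cases ns with
    | nil => simp [pvZFold]
    | cons n ns =>
      simp only [List.map_cons, List.zip_cons_cons, pvZFold, List.foldl_cons]
      have : ((b :: bs).drop (p.1 + 1)).take (n + 1 - (p.1 + 1)) =
          (bs.drop p.1).take (n - p.1) := by
        simp [List.drop_succ_cons, Nat.succ_sub_succ]
      rw [this]
      exact ih ns _

lemma pvA1 (sk : String) (blocks : List String) :
    ∀ (t : List (Nat × String)) (k : Nat) (d : PySem.Dict String String),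
      (pvHsN blocks).drop k = t →
      (PySem.List.enumerate (t.map (fun p => ((p.1 : Int), p.2))) (k : Int)).foldl
        (fun d pe =>
          let next_idx : Int :=
            if pe.1 + 1 < PySem.List.len ((pvHsN blocks).map (fun p => ((p.1 : Int), p.2))) then
              (PySem.List.pyGetD ((pvHsN blocks).map (fun p => ((p.1 : Int), p.2)))
                (pe.1 + 1) (0, "")).1
            else PySem.List.len blocks
          pvEmit sk d pe.2.2 (PySem.List.slice blocks (some pe.2.1) (some next_idx))) d
      = pvZFold sk blocks d (t.zip ((t.map (·.1)).drop 1 ++ [blocks.length])) := by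
  intro t
  induction t with
  | nil => intro k d h; simp [PySem.List.enumerate_nil, pvZFold]
  | cons x t ih =>
    intro k d h
    have hk : (pvHsN blocks)[k]? = some x := by
      rw [← List.head?_drop, h, List.head?_cons]
    have hklt : k < (pvHsN blocks).length := List.getElem?_eq_some_iff.mp hk |>.1
    have hdrop : (pvHsN blocks).drop (k + 1) = t := by
      rw [← List.tail_drop, h, List.tail_cons]
    rw [List.map_cons, PySem.List.enumerate_cons, List.foldl_cons]
    have hstep : ((k : Int) + 1) = (((k + 1 : Nat)) : Int) := by push_cast; ring
    cases t with
    | nil =>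
      have hlen : (pvHsN blocks).length = k + 1 := by
        have := congrArg List.length h
        rw [List.length_drop] at this
        simp at this
        omega
      have hcond : ¬ ((k : Int) + 1 <
          ((((pvHsN blocks).map (fun p => ((p.1 : Int), p.2))).length : Nat) : Int)) := by
        rw [List.length_map, hlen]
        push_cast
        omega
      simp only [PySem.List.enumerate_nil, List.foldl_nil, PySem.List.len_eq, hcond, if_false]
      rw [PySem.List.slice_natCast]
      simp [pvZFold]
    | cons y t' =>
      have hky : (pvHsN blocks)[k + 1]? = some y := by
        rw [← List.head?_drop, hdrop, List.head?_cons]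
      have hklt2 : k + 1 < (pvHsN blocks).length := List.getElem?_eq_some_iff.mp hky |>.1
      have hcond : ((k : Int) + 1 <
          ((((pvHsN blocks).map (fun p => ((p.1 : Int), p.2))).length : Nat) : Int)) := by
        rw [List.length_map]
        push_cast
        omega
      have hget : (PySem.List.pyGetD ((pvHsN blocks).map (fun p => ((p.1 : Int), p.2)))
          ((k : Int) + 1) (0, "")).1 = (y.1 : Int) := by
        rw [hstep, PySem.List.pyGetD_natCast, List.getD_eq_getElem?_getD,
          List.getElem?_map, hky]
        rfl
      simp only [PySem.List.len_eq, hcond, if_pos, hget]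
      rw [PySem.List.slice_natCast]
      have hih := ih (k + 1) (pvEmit sk d x.2 ((blocks.drop x.1).take (y.1 - x.1))) hdrop
      simp only [PySem.List.len_eq] at hih
      rw [hstep, hih]
      simp [pvZFold]

lemma pvG (sk : String) (blocks : List String) : ∀ d,
    pvZFold sk blocks d ((pvHsN blocks).zip (pvNexts blocks)) = pvGoTop sk d blocks := by
  induction blocks with
  | nil => intro d; simp [pvHsN, pvNexts, pvZFold, pvGoTop]
  | cons b bs ih =>
    intro d
    by_cases hH : pvIsHeader b = true
    · rw [pvGoTop, if_pos hH, pvGB]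
      cases hbs : pvHsN bs with
      | nil =>
        have hnx : pvNexts (b :: bs) = [bs.length + 1] := by
          simp [pvNexts, pvHsN, hH, hbs]
        have hhs : pvHsN (b :: bs) = [((0 : Nat), b)] := by
          simp [pvHsN, hH, hbs]
        rw [hhs, hnx]
        simp only [List.zip_cons_cons, pvZFold,
          List.foldl_cons, List.foldl_nil, List.drop_zero, Nat.sub_zero]
        rw [List.take_of_length_le (by simp)]
        rw [pvTake_nil bs hbs]
        rw [pvGoTop_noheader sk bs (pvHsN_nil_noheader bs hbs)]
        simp
      | cons q qs =>
        have hhs : pvHsN (b :: bs) = ((0 : Nat), b) ::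
            (q :: qs).map (fun p : Nat × String => (p.1 + 1, p.2)) := by
          simp [pvHsN, hH, hbs]
        have hnx : pvNexts (b :: bs) = (q.1 + 1) :: (pvNexts bs).map (· + 1) := by
          simp only [pvNexts, hhs, List.map_cons, List.drop_succ_cons, List.drop_zero,
            List.length_cons, hbs]
          simp [List.map_map, Function.comp]
        rw [hhs, hnx, ← hbs]
        simp only [List.zip_cons_cons, pvZFold, List.foldl_cons, List.drop_zero, Nat.sub_zero]
        rw [List.take_succ_cons]
        rw [pvTake_cons bs q.1 q.2 qs (by simpa using hbs)]
        have := pvZFold_shift sk b bs (pvHsN bs) (pvNexts bs)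
          (pvEmit sk d b (b :: bs.takeWhile (fun x => !pvIsHeader x)))
      -- restore pvZFold form
        rw [show (List.foldl
            (fun d q => pvEmit sk d q.1.2 (((b :: bs).drop q.1.1).take (q.2 - q.1.1)))
            (pvEmit sk d b (b :: bs.takeWhile (fun x => !pvIsHeader x)))
            (((pvHsN bs).map (fun p : Nat × String => (p.1 + 1, p.2))).zip
              ((pvNexts bs).map (· + 1)))) = pvZFold sk (b :: bs)
            (pvEmit sk d b (b :: bs.takeWhile (fun x => !pvIsHeader x)))
            (((pvHsN bs).map (fun p : Nat × String => (p.1 + 1, p.2))).zip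
              ((pvNexts bs).map (· + 1))) from rfl]
        rw [this, ih]
        simp
    · have hhs : pvHsN (b :: bs) = (pvHsN bs).map (fun p : Nat × String => (p.1 + 1, p.2)) := by
        simp [pvHsN, hH]
      have hnx : pvNexts (b :: bs) = (pvNexts bs).map (· + 1) := by
        simp only [pvNexts, hhs, List.map_map, List.length_cons, List.map_append]
        rw [← List.map_drop]
        simp only [List.drop_one, ← List.map_tail, List.map_map, List.map_cons, List.map_nil]
        exact congrArg₂ _ (List.map_congr_left (fun p _ => rfl)) rfl
      rw [hhs, hnx, pvZFold_shift, ih, pvGoTop, if_neg hH]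

-- ===== VERDICT (by name: the statement is the Claim_ definition above) =====
theorem split_sub_sections_py_spec : Claim_equal_split_sub_sections_py := by
  intro sk text _
  unfold Spec_split_sub_sections_py
  show split_sub_sections_py sk text = split_sub_sections_py_alt sk text
  simp only [split_sub_sections_py, split_sub_sections_py_alt]
  have hfilter : (PySem.List.enumerate (pvBlocks text)).foldl
      (fun acc p => if pvIsHeader p.2 then acc ++ [p] else acc) ([] : List (Int × String)) =
      (pvHsN (pvBlocks text)).map (fun p => ((p.1 : Int), p.2)) := by
    rw [PySem.List.foldl_append_if_eq_filter, List.nil_append, pvEnumFilter]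
    exact List.map_congr_left (fun p _ => by simp)
  rw [hfilter]
  have hlen : ((pvHsN (pvBlocks text)).map (fun p => ((p.1 : Int), p.2))).length =
      (pvBlocks text).countP (fun b => pvIsHeader b) := by
    rw [List.length_map, pvHsN_length]
  rw [hlen]
  by_cases hnil : pvBlocks text = []
  · simp [hnil]
  · rw [if_neg hnil]
    by_cases hg : (pvBlocks text).countP (fun b => pvIsHeader b) ≤ 1
    · rw [if_pos hg, if_pos hg]
    · rw [if_neg hg, if_neg hg]
      have hA := pvA1 sk (pvBlocks text) (pvHsN (pvBlocks text)) 0 PySem.Dict.empty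
        (by simp)
      simp only [Nat.cast_zero] at hA
      rw [hA]
      rw [show ((pvHsN (pvBlocks text)).map (·.1)).drop 1 ++ [(pvBlocks text).length] =
        pvNexts (pvBlocks text) from rfl]
      rw [pvG]
      have hB := pvFoldB_none sk (pvBlocks text) PySem.Dict.empty
      rcases hst : ((pvBlocks text).foldl (pvStep sk) (PySem.Dict.empty, Option.none)).2 with
        _ | ⟨h, g⟩
      · simp only [pvFin, hst] at hB
        simp only [hst]
        rw [hB]
      · simp only [pvFin, hst] at hB
        simp only [hst]
        rw [hB]
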